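-- pv_equiv track=rewrite | github.com/LMMinier/quantoniumos | algorithms/rft/core/fibonacci_fast_rft.py | optimal_fibonacci_size
-- ===== SOURCE A (Python) =====
-- from typing import List, Tuple, Optional
--
-- def fibonacci_sequence(max_val: int) -> List[int]:
--     """Get all Fibonacci numbers up to max_val."""
--     fibs = [1, 1]
--     while fibs[-1] + fibs[-2] <= max_val:
--         fibs.append(fibs[-1] + fibs[-2])
--     return fibs
--
-- def optimal_fibonacci_size(target_N: int,
--                            allow_smaller: bool = True) -> Tuple[int, int]:
--     """
--     Find optimal Fibonacci number for RFT of target size.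
--
--     Returns (F_k, k) where F_k is closest Fibonacci ≥ target_N
--     (or ≤ if allow_smaller and it's closer).
--     """
--     fibs = fibonacci_sequence(2 * target_N)
--
--     best_fib = None
--     best_idx = None
--     best_dist = float('inf')
--
--     for i, f in enumerate(fibs):
--         if not allow_smaller and f < target_N:
--             continue
--         dist = abs(f - target_N)
--         if dist < best_dist:
--             best_dist = dist
--             best_fib = f
--             best_idx = i + 1
--
--     return best_fib, best_idx
-- ===== SOURCE B (Python) =====
-- def optimal_fibonacci_size(target_N, allow_smaller=True):
--     """Bracketing: advance (prev, curr) until curr >= target_N, then pick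
--     between the two bracketing Fibonacci numbers with one comparison --
--     no list is built and no running minimum is tracked."""
--     if target_N <= 1:
--         return (1, 1)
--     prev, curr, idx = 1, 1, 2   # curr is the Fibonacci value at 1-based position idx
--     while curr < target_N:
--         prev, curr, idx = curr, prev + curr, idx + 1
--     if allow_smaller and target_N - prev <= curr - target_N:
--         return (prev, idx - 1)
--     return (curr, idx)
-- ===== Notes on version B (the rewrite author's own statement) =====
-- stated objective: simpler
-- what changed: B replaces A's generate-a-list-to-2N-then-scan-for-minimum-distance with direct bracketing: it advances a (prev, curr) Fibonacci pair until curr >= target_N and selects between the two bracketing values with a single arithmetic comparison, tracking no list, no distances and no running best.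
import Mathlib
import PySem

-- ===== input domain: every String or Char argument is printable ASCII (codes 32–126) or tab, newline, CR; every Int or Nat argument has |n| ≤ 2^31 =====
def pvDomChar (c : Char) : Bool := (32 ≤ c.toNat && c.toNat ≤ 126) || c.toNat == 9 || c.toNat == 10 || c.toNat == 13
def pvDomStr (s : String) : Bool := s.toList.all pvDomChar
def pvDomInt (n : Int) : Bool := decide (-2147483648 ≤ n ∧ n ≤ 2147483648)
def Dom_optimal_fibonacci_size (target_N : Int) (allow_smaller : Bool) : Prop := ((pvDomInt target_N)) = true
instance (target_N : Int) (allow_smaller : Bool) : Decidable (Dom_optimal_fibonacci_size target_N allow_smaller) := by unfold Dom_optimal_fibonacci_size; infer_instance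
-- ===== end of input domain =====

-- B replaces A's build-list-then-scan-for-minimum with direct bracketing of target_N
-- between two consecutive Fibonacci numbers and one arithmetic comparison; same cost, simpler.

-- ===== PORT A =====
-- while fibs[-1] + fibs[-2] <= max_val: fibs.append(...)  (fuel is only an upper bound on iterations; the loop exits by its own test)
def pvFibSeqLoop (maxVal : Int) : Nat → List Int → List Int
  | 0, fibs => fibs
  | fuel+1, fibs =>
    let s := (PySem.List.pyGet? fibs (-1)).getD 0 + (PySem.List.pyGet? fibs (-2)).getD 0
    if s ≤ maxVal then pvFibSeqLoop maxVal fuel (fibs ++ [s]) else fibs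

def fibonacci_sequence (maxVal : Int) : List Int := pvFibSeqLoop maxVal (maxVal.toNat + 1) [1, 1]

-- for i, f in enumerate(fibs): ...  -- best_dist = float('inf') is modelled as `none` (= +infinity);
-- best_fib/best_idx start as None; the final .getD 0 is unreachable (the loop always selects a candidate).
def pvScanA (target_N : Int) (allow_smaller : Bool) :
    List Int → Int → (Option Int × Option Int × Option Int) → (Option Int × Option Int × Option Int)
  | [], _, st => st
  | f :: rest, i, st =>
    if allow_smaller = false ∧ f < target_N then pvScanA target_N allow_smaller rest (i+1) st
    else
      let dist := |f - target_N|
      let st' := match st.2.2 with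
        | none => (some f, some (i+1), some dist)
        | some bd => if dist < bd then (some f, some (i+1), some dist) else st
      pvScanA target_N allow_smaller rest (i+1) st'

def optimal_fibonacci_size (target_N : Int) (allow_smaller : Bool) : Int × Int :=
  let fibs := fibonacci_sequence (2 * target_N)
  let st := pvScanA target_N allow_smaller fibs 0 (none, none, none)
  ((st.1).getD 0, (st.2.1).getD 0)

-- ===== PORT B =====
-- while curr < target_N: prev, curr, idx = curr, prev+curr, idx+1  (fuel is an upper bound only)
def pvBracket (target_N : Int) : Nat → Int → Int → Int → Int × Int × Int
  | 0, prev, curr, idx => (prev, curr, idx)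
  | fuel+1, prev, curr, idx =>
    if curr < target_N then pvBracket target_N fuel curr (prev + curr) (idx + 1)
    else (prev, curr, idx)

def optimal_fibonacci_size_alt (target_N : Int) (allow_smaller : Bool) : Int × Int :=
  if target_N ≤ 1 then (1, 1)
  else
    let r := pvBracket target_N target_N.toNat 1 1 2
    if allow_smaller = true ∧ target_N - r.1 ≤ r.2.1 - target_N then (r.1, r.2.2 - 1)
    else (r.2.1, r.2.2)

-- ===== PRECONDITION & SPEC =====
def Spec_optimal_fibonacci_size (target_N : Int) (allow_smaller : Bool) (out : Int × Int) : Prop := out = optimal_fibonacci_size_alt target_N allow_smaller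
instance (target_N : Int) (allow_smaller : Bool) (out : Int × Int) : Decidable (Spec_optimal_fibonacci_size target_N allow_smaller out) := by unfold Spec_optimal_fibonacci_size; infer_instance

-- ===== CLAIM (what is proved, stated in full; the proofs are below) =====
def Claim_equal_optimal_fibonacci_size : Prop := ∀ (target_N : Int) (allow_smaller : Bool), Dom_optimal_fibonacci_size target_N allow_smaller → Spec_optimal_fibonacci_size target_N allow_smaller (optimal_fibonacci_size target_N allow_smaller)

-- ===== LEMMAS AND PROOFS =====

-- the tail of Fibonacci values A's builder appends after its seed, as a pure generator
def pvGenTail (m : Int) : Nat → Int → Int → List Int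
  | 0, _, _ => []
  | fuel+1, a, b => if a + b ≤ m then (a+b) :: pvGenTail m fuel b (a+b) else []

theorem pvGet_neg2 (pre : List Int) (a b : Int) :
    PySem.List.pyGet? (pre ++ [a, b]) (-2) = some a := by
  rw [PySem.List.pyGet?_neg_ofNat _ 2 (by omega) (by simp)]
  simp

theorem pvGet_neg1 (pre : List Int) (a b : Int) :
    PySem.List.pyGet? (pre ++ [a, b]) (-1) = some b := by
  have h : pre ++ [a, b] = (pre ++ [a]) ++ [b] := by simp
  rw [h, PySem.List.pyGet?_neg_one_append_singleton]

theorem pvFibSeqLoop_eq (m : Int) (fuel : Nat) :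
    ∀ (pre : List Int) (a b : Int),
      pvFibSeqLoop m fuel (pre ++ [a, b]) = (pre ++ [a, b]) ++ pvGenTail m fuel a b := by
  induction fuel with
  | zero => intro pre a b; simp [pvFibSeqLoop, pvGenTail]
  | succ fuel ih =>
    intro pre a b
    simp only [pvFibSeqLoop, pvGenTail, pvGet_neg1, pvGet_neg2, Option.getD_some]
    have hc : b + a = a + b := by ring
    rw [hc]
    by_cases h : a + b ≤ m
    · simp only [h, if_true]
      have h2 : (pre ++ [a, b]) ++ [a + b] = (pre ++ [a]) ++ [b, a + b] := by simp
      rw [h2, ih (pre ++ [a]) b (a + b)]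
      simp
    · simp [h]

-- every value the generator emits is at least a + b
theorem pvGenTail_ge (m : Int) (fuel : Nat) :
    ∀ (a b f : Int), 1 ≤ a → 1 ≤ b → f ∈ pvGenTail m fuel a b → a + b ≤ f := by
  induction fuel with
  | zero => intro a b f _ _ h; simp [pvGenTail] at h
  | succ fuel ih =>
    intro a b f ha hb h
    simp only [pvGenTail] at h
    by_cases hm : a + b ≤ m
    · rw [if_pos hm] at h
      rcases List.mem_cons.mp h with h | h
      · omega
      · have := ih b (a+b) f hb (by omega) h
        omega
    · rw [if_neg hm] at h; simp at h

-- once every remaining element is at least as far from target_N as the recorded best, the scan is inert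
theorem pvScan_noupdate (N : Int) (aS : Bool) :
    ∀ (L : List Int) (i bf bi bd : Int), (∀ f ∈ L, bd ≤ |f - N|) →
      pvScanA N aS L i (some bf, some bi, some bd) = (some bf, some bi, some bd) := by
  intro L
  induction L with
  | nil => intro _ _ _ _ _; rfl
  | cons f rest ih =>
    intro i bf bi bd hb
    simp only [pvScanA]
    have hf : bd ≤ |f - N| := hb f (List.mem_cons_self ..)
    have hrest : ∀ g ∈ rest, bd ≤ |g - N| := fun g hg => hb g (List.mem_cons_of_mem _ hg)
    by_cases hs : aS = false ∧ f < N
    · rw [if_pos hs]; exact ih _ _ _ _ hrest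
    · rw [if_neg hs]
      rw [if_neg (not_lt.mpr hf)]
      exact ih _ _ _ _ hrest

theorem pvBracket_stop (N : Int) (fuel : Nat) (a b idx : Int) (h : ¬ b < N) :
    pvBracket N fuel a b idx = (a, b, idx) := by
  cases fuel <;> simp [pvBracket, h]

-- fused correctness, allow_smaller = true: scanning the rest of A's list from the aligned
-- best state equals B's bracket-then-compare selection
theorem pvMainT (N : Int) (hN : 2 ≤ N) (fuelA : Nat) :
    ∀ (fuelB : Nat) (a b idx : Int), 1 ≤ a → a ≤ b → b < N →
      (2*N + 1 - (a+b)).toNat ≤ fuelA → (N - b).toNat ≤ fuelB →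
      pvScanA N true (pvGenTail (2*N) fuelA a b) idx (some b, some idx, some (N - b)) =
        (let r := pvBracket N fuelB a b idx;
         if N - r.1 ≤ r.2.1 - N then (some r.1, some (r.2.2 - 1), some (N - r.1))
         else (some r.2.1, some r.2.2, some (r.2.1 - N))) := by
  induction fuelA with
  | zero => intro fuelB a b idx ha hab hb hfa _; omega
  | succ fuelA ih =>
    intro fuelB a b idx ha hab hb hfa hfb
    cases fuelB with
    | zero => omega
    | succ fb =>
      have hm : a + b ≤ 2*N := by omega
      simp only [pvGenTail, if_pos hm, pvScanA, pvBracket, if_pos hb]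
      rw [if_neg (show ¬(true = false ∧ a + b < N) by simp)]
      by_cases hlt : a + b < N
      · have habs : |a + b - N| = N - (a + b) := by rw [abs_of_nonpos (by omega)]; ring
        rw [habs, if_pos (show N - (a+b) < N - b by omega)]
        rw [ih fb b (a+b) (idx+1) (by omega) (by omega) hlt (by omega) (by omega)]
      · have habs : |a + b - N| = a + b - N := abs_of_nonneg (by omega)
        rw [habs]
        have hge : ∀ f ∈ pvGenTail (2*N) fuelA b (a+b), b + (a+b) ≤ f :=
          fun f hf => pvGenTail_ge _ _ _ _ _ (by omega) (by omega) hf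
        rw [pvBracket_stop N fb b (a+b) (idx+1) (by omega)]
        by_cases hc : a + b - N < N - b
        · rw [if_pos hc]
          rw [pvScan_noupdate N true _ _ _ _ _
            (fun f hf => le_trans (by have := hge f hf; omega) (le_abs_self _))]
          rw [if_neg (show ¬ N - b ≤ a + b - N by omega)]
        · rw [if_neg hc]
          rw [pvScan_noupdate N true _ _ _ _ _
            (fun f hf => le_trans (by have := hge f hf; omega) (le_abs_self _))]
          rw [if_pos (show N - b ≤ a + b - N by omega)]
          norm_num

-- fused correctness, allow_smaller = false: all values below target_N are skipped, the first
-- value ≥ target_N (the bracket's curr) is selected and nothing later replaces it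
theorem pvMainF (N : Int) (hN : 2 ≤ N) (fuelA : Nat) :
    ∀ (fuelB : Nat) (a b idx : Int), 1 ≤ a → a ≤ b → b < N →
      (2*N + 1 - (a+b)).toNat ≤ fuelA → (N - b).toNat ≤ fuelB →
      pvScanA N false (pvGenTail (2*N) fuelA a b) idx (none, none, none) =
        (let r := pvBracket N fuelB a b idx;
         (some r.2.1, some r.2.2, some (r.2.1 - N))) := by
  induction fuelA with
  | zero => intro fuelB a b idx ha hab hb hfa _; omega
  | succ fuelA ih =>
    intro fuelB a b idx ha hab hb hfa hfb
    cases fuelB with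
    | zero => omega
    | succ fb =>
      have hm : a + b ≤ 2*N := by omega
      simp only [pvGenTail, if_pos hm, pvScanA, pvBracket, if_pos hb]
      by_cases hlt : a + b < N
      · rw [if_pos (show True ∧ a + b < N from ⟨trivial, hlt⟩)]
        rw [ih fb b (a+b) (idx+1) (by omega) (by omega) hlt (by omega) (by omega)]
      · rw [if_neg (show ¬(True ∧ a + b < N) by simp [hlt])]
        have habs : |a + b - N| = a + b - N := abs_of_nonneg (by omega)
        rw [habs]
        have hge : ∀ f ∈ pvGenTail (2*N) fuelA b (a+b), b + (a+b) ≤ f :=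
          fun f hf => pvGenTail_ge _ _ _ _ _ (by omega) (by omega) hf
        rw [pvScan_noupdate N false _ _ _ _ _
          (fun f hf => le_trans (by have := hge f hf; omega) (le_abs_self _))]
        rw [pvBracket_stop N fb b (a+b) (idx+1) (by omega)]

-- A's list is the two seed 1s followed by the generated tail
theorem pvFibs_eq (N : Int) :
    fibonacci_sequence (2*N) = 1 :: 1 :: pvGenTail (2*N) ((2*N).toNat + 1) 1 1 := by
  unfold fibonacci_sequence
  have h : ([1, 1] : List Int) = [] ++ [(1:Int), 1] := by simp
  rw [h, pvFibSeqLoop_eq]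
  simp

-- ===== VERDICT (by name: the statement is the Claim_ definition above) =====
theorem optimal_fibonacci_size_spec : Claim_equal_optimal_fibonacci_size := by
  intro N aS _
  unfold Spec_optimal_fibonacci_size optimal_fibonacci_size optimal_fibonacci_size_alt
  rw [pvFibs_eq]
  by_cases hN1 : N ≤ 1
  · -- both 1s are candidates at distance 1 - N, the first wins, the tail never improves
    rw [if_pos hN1]
    simp only [pvScanA]
    rw [if_neg (show ¬(aS = false ∧ (1:Int) < N) by rintro ⟨-, h⟩; omega),
        if_neg (show ¬(aS = false ∧ (1:Int) < N) by rintro ⟨-, h⟩; omega)]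
    have habs : |1 - N| = 1 - N := abs_of_nonneg (by omega)
    rw [habs, if_neg (show ¬ (1 - N < 1 - N) by omega)]
    rw [pvScan_noupdate N aS _ _ _ _ _ (fun f hf => by
      have := pvGenTail_ge (2*N) ((2*N).toNat + 1) 1 1 f (by omega) (by omega) hf
      have := le_abs_self (f - N)
      omega)]
    simp
  · rw [if_neg hN1]
    have hN : 2 ≤ N := by omega
    cases aS with
    | false =>
      simp only [pvScanA]
      rw [if_pos (show True ∧ (1:Int) < N from ⟨trivial, by omega⟩),
          if_pos (show True ∧ (1:Int) < N from ⟨trivial, by omega⟩)]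
      have h02 : (0:Int) + 1 + 1 = 2 := by norm_num
      rw [h02]
      rw [pvMainF N hN ((2*N).toNat + 1) N.toNat 1 1 2 (by omega) (by omega) (by omega)
        (by omega) (by omega)]
      rw [if_neg (show ¬(false = true ∧ N - (pvBracket N N.toNat 1 1 2).1 ≤ (pvBracket N N.toNat 1 1 2).2.1 - N) by simp)]
      simp
    | true =>
      by_cases hN2 : N = 2
      · subst hN2; decide
      · -- N ≥ 3: scan the two 1s and the 2 by hand, then hand over to the fused lemma
        have hN3 : 3 ≤ N := by omega
        simp only [pvScanA]
        rw [if_neg (show ¬(true = false ∧ (1:Int) < N) by simp),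
            if_neg (show ¬(true = false ∧ (1:Int) < N) by simp)]
        have h1 : |1 - N| = N - 1 := by rw [abs_of_nonpos (by omega)]; ring
        rw [h1, if_neg (show ¬ (N - 1 < N - 1) by omega)]
        have htail : pvGenTail (2*N) ((2*N).toNat + 1) 1 1
            = 2 :: pvGenTail (2*N) (2*N).toNat 1 2 := by
          simp only [pvGenTail]
          rw [if_pos (by omega)]
          norm_num
        rw [htail]
        simp only [pvScanA]
        rw [if_neg (show ¬(true = false ∧ (2:Int) < N) by simp)]
        have h2 : |2 - N| = N - 2 := by rw [abs_of_nonpos (by omega)]; ring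
        rw [h2, if_pos (show N - 2 < N - 1 by omega)]
        have h03 : (0:Int) + 1 + 1 + 1 = 3 := by norm_num
        rw [h03]
        obtain ⟨k, hk⟩ : ∃ k, N.toNat = k + 1 := ⟨N.toNat - 1, by omega⟩
        have hbr : pvBracket N N.toNat 1 1 2 = pvBracket N k 1 2 3 := by
          rw [hk]; simp only [pvBracket]; rw [if_pos (by omega)]; norm_num
        rw [hbr]
        have := pvMainT N hN (2*N).toNat k 1 2 3 (by omega) (by omega) (by omega)
          (by omega) (by omega)
        rw [this]
        simp only
        by_cases hc : N - (pvBracket N k 1 2 3).1 ≤ (pvBracket N k 1 2 3).2.1 - N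
        · rw [if_pos hc, if_pos (show True ∧ N - (pvBracket N k 1 2 3).1 ≤ (pvBracket N k 1 2 3).2.1 - N from ⟨trivial, hc⟩)]
          simp
        · rw [if_neg hc, if_neg (show ¬(True ∧ N - (pvBracket N k 1 2 3).1 ≤ (pvBracket N k 1 2 3).2.1 - N) by simp [hc])]
          simp
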